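-- pv_equiv track=rewrite | github.com/akhterzeeshaansiddiqua/HunarInternn | Flames game.py | remove_common_letters
-- ===== SOURCE A (Python) =====
-- def remove_common_letters(name1, name2):
--     name1 = name1.replace(" ", "").lower()
--     name2 = name2.replace(" ", "").lower()
--
--     name1_list = list(name1)
--     name2_list = list(name2)
--
--     for letter in name1[:]:
--         if letter in name2_list:
--             name1_list.remove(letter)
--             name2_list.remove(letter)
--
--     count = len(name1_list) + len(name2_list)
--     return count
-- ===== SOURCE B (Python) =====
-- def remove_common_letters(name1, name2):
--     a = sorted(name1.replace(" ", "").lower())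
--     b = sorted(name2.replace(" ", "").lower())
--     i = j = common = 0
--     while i < len(a) and j < len(b):
--         if a[i] == b[j]:
--             common += 1
--             i += 1
--             j += 1
--         elif a[i] < b[j]:
--             i += 1
--         else:
--             j += 1
--     return len(a) + len(b) - 2 * common
-- ===== Notes on version B (the rewrite author's own statement) =====
-- stated objective: faster
-- what changed: Replaces the quadratic loop of repeated list membership tests and list.remove calls with sort-then-two-pointer merge counting shared letters with multiplicity, returning len1+len2-2*common.
import Mathlib
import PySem

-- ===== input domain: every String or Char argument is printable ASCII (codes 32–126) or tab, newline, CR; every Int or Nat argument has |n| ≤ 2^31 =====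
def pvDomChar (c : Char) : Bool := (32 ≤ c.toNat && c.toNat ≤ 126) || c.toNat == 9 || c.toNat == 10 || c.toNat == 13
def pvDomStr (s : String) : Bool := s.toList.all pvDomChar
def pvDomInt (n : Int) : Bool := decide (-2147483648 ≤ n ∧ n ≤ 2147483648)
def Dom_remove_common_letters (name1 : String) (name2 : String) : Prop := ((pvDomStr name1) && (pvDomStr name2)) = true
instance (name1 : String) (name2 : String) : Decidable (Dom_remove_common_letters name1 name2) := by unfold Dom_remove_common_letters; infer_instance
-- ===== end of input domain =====

-- B replaces A's quadratic membership-test/remove loop by sort + two-pointer merge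
-- counting shared letters with multiplicity; same return value, different algorithm.

-- ===== PORT A =====
def remove_common_letters (name1 : String) (name2 : String) : Int :=
  let n1 := PySem.Str.lower (PySem.Str.replace name1 " " "")
  let n2 := PySem.Str.lower (PySem.Str.replace name2 " " "")
  -- for letter in name1[:]: if letter in name2_list: remove from both lists
  -- (the `remove` on name1_list never misses — at most one removal per iterated
  --  occurrence — so Python never raises here and `List.erase` is exact)
  let st := n1.toList.foldl
    (fun (st : List Char × List Char) letter =>
      if letter ∈ st.2 then (st.1.erase letter, st.2.erase letter) else st)
    (n1.toList, n2.toList)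
  ((st.1.length + st.2.length : Nat) : Int)

-- ===== PORT B =====
-- the while loop of Source B: two pointers over the sorted lists, counting common letters
def altCommon : List Char → List Char → Nat
  | [], _ => 0
  | _ :: _, [] => 0
  | a :: as, b :: bs =>
    if a = b then altCommon as bs + 1
    else if a < b then altCommon as (b :: bs)
    else altCommon (a :: as) bs
termination_by as bs => as.length + bs.length

def remove_common_letters_alt (name1 : String) (name2 : String) : Int :=
  let a := (PySem.Str.lower (PySem.Str.replace name1 " " "")).toList.mergeSort
             (fun x y => decide (x ≤ y))
  let b := (PySem.Str.lower (PySem.Str.replace name2 " " "")).toList.mergeSort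
             (fun x y => decide (x ≤ y))
  (a.length : Int) + (b.length : Int) - 2 * (altCommon a b : Int)

-- ===== PRECONDITION & SPEC =====
def Spec_remove_common_letters (name1 : String) (name2 : String) (out : Int) : Prop := out = remove_common_letters_alt name1 name2
instance (name1 : String) (name2 : String) (out : Int) : Decidable (Spec_remove_common_letters name1 name2 out) := by unfold Spec_remove_common_letters; infer_instance

-- ===== CLAIM (what is proved, stated in full; the proofs are below) =====
def Claim_equal_remove_common_letters : Prop := ∀ (name1 : String) (name2 : String), Dom_remove_common_letters name1 name2 → Spec_remove_common_letters name1 name2 (remove_common_letters name1 name2)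

-- ===== LEMMAS AND PROOFS =====

lemma msub_cons_of_mem (c : Char) (s t : Multiset Char) (h : c ∈ t) :
    (c ::ₘ s) - t = s - t.erase c := by
  ext x
  rw [Multiset.count_sub, Multiset.count_sub, Multiset.count_cons]
  by_cases hx : x = c
  · subst hx
    rw [Multiset.count_erase_self, if_pos rfl]
    have := Multiset.count_pos.2 h
    omega
  · rw [Multiset.count_erase_of_ne hx, if_neg hx]; omega

lemma msub_cons_of_not_mem (c : Char) (s t : Multiset Char) (h : c ∉ t) :
    (c ::ₘ s) - t = c ::ₘ (s - t) := by
  have hz : Multiset.count c t = 0 := Multiset.count_eq_zero.2 h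
  ext x
  rw [Multiset.count_sub, Multiset.count_cons, Multiset.count_cons, Multiset.count_sub]
  by_cases hx : x = c
  · subst hx; simp [hz]
  · simp [hx]

lemma mcons_shuffle (c : Char) (r pre : Multiset Char) :
    (c ::ₘ r) + pre = r + (c ::ₘ pre) := by
  rw [Multiset.cons_add, Multiset.add_cons]

-- A's loop invariant, stated on multisets: after folding the remaining letters r,
-- the first list is pre + (r - l2) and the second is l2 - r.
lemma loopA_invariant (r : List Char) : ∀ (l2 l1 : List Char) (pre : Multiset Char),
    (↑l1 : Multiset Char) = ↑r + pre →
    (↑((r.foldl (fun (st : List Char × List Char) letter =>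
        if letter ∈ st.2 then (st.1.erase letter, st.2.erase letter) else st) (l1, l2)).1)
      : Multiset Char) = pre + ((↑r : Multiset Char) - ↑l2)
    ∧ (↑((r.foldl (fun (st : List Char × List Char) letter =>
        if letter ∈ st.2 then (st.1.erase letter, st.2.erase letter) else st) (l1, l2)).2)
      : Multiset Char) = (↑l2 : Multiset Char) - ↑r := by
  induction r with
  | nil => intro l2 l1 pre h; simpa using h
  | cons c r ih =>
    intro l2 l1 pre h
    simp only [List.foldl_cons]
    by_cases hc : c ∈ l2
    · have hcm : c ∈ (↑l2 : Multiset Char) := by simpa using hc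
      simp only [if_pos hc]
      obtain ⟨h1, h2⟩ := ih (l2.erase c) (l1.erase c) pre
        (by
          rw [← Multiset.coe_erase, h, ← Multiset.cons_coe, Multiset.cons_add,
            Multiset.erase_cons_head])
      refine ⟨?_, ?_⟩
      · rw [h1, ← Multiset.cons_coe, msub_cons_of_mem _ _ _ hcm, Multiset.coe_erase]
      · rw [h2, ← Multiset.cons_coe, Multiset.sub_cons, Multiset.coe_erase]
    · have hcm : c ∉ (↑l2 : Multiset Char) := by simpa using hc
      simp only [if_neg hc]
      obtain ⟨h1, h2⟩ := ih l2 l1 (c ::ₘ pre)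
        (by rw [h, ← Multiset.cons_coe, mcons_shuffle])
      refine ⟨?_, ?_⟩
      · rw [h1, ← Multiset.cons_coe, msub_cons_of_not_mem _ _ _ hcm,
          Multiset.cons_add, Multiset.add_cons]
      · rw [h2, ← Multiset.cons_coe, Multiset.sub_cons,
          Multiset.erase_of_notMem hcm]

-- multiset intersection of two cons with equal heads
lemma inter_cons_both (a : Char) (s t : Multiset Char) :
    (a ::ₘ s) ∩ (a ::ₘ t) = a ::ₘ (s ∩ t) := by
  ext x
  simp only [Multiset.count_inter, Multiset.count_cons]
  by_cases hx : x = a <;> simp [hx]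

lemma inter_cons_left_not_mem {a : Char} {s t : Multiset Char} (h : a ∉ t) :
    (a ::ₘ s) ∩ t = s ∩ t := by
  have hz : Multiset.count a t = 0 := Multiset.count_eq_zero.2 h
  ext x
  simp only [Multiset.count_inter, Multiset.count_cons]
  by_cases hx : x = a
  · subst hx; simp [hz]
  · simp [hx]

lemma inter_cons_right_not_mem {b : Char} {s t : Multiset Char} (h : b ∉ s) :
    s ∩ (b ::ₘ t) = s ∩ t := by
  have hz : Multiset.count b s = 0 := Multiset.count_eq_zero.2 h
  ext x
  simp only [Multiset.count_inter, Multiset.count_cons]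
  by_cases hx : x = b
  · subst hx; simp [hz]
  · simp [hx]

-- the two-pointer count on sorted lists is the cardinality of the multiset intersection
lemma altCommon_eq_card_inter (as bs : List Char) :
    as.Pairwise (· ≤ ·) → bs.Pairwise (· ≤ ·) →
    altCommon as bs = Multiset.card ((↑as : Multiset Char) ∩ ↑bs) := by
  fun_induction altCommon as bs with
  | case1 bs => intro _ _; simp
  | case2 a as => intro _ _; simp
  | case3 as a bs ih =>
    intro ha hb
    rw [← Multiset.cons_coe, ← Multiset.cons_coe, inter_cons_both, Multiset.card_cons,
      ih ((List.pairwise_cons.1 ha).2) ((List.pairwise_cons.1 hb).2)]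
  | case4 a as b bs hab hlt ih =>
    intro ha hb
    have hnot : a ∉ (↑(b :: bs) : Multiset Char) := by
      simp only [Multiset.mem_coe, List.mem_cons]
      rintro (h | h)
      · exact hab h
      · exact absurd (lt_of_lt_of_le hlt ((List.pairwise_cons.1 hb).1 _ h)) (lt_irrefl a)
    rw [← Multiset.cons_coe (a := a), inter_cons_left_not_mem hnot,
      ih ((List.pairwise_cons.1 ha).2) hb]
  | case5 a as b bs hab hlt ih =>
    intro ha hb
    have hba : b < a := lt_of_le_of_ne (le_of_not_gt hlt) (fun h => hab h.symm)
    have hnot : b ∉ (↑(a :: as) : Multiset Char) := by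
      simp only [Multiset.mem_coe, List.mem_cons]
      rintro (h | h)
      · exact hab h.symm
      · exact absurd (lt_of_lt_of_le hba ((List.pairwise_cons.1 ha).1 _ h)) (lt_irrefl b)
    rw [← Multiset.cons_coe (a := b), inter_cons_right_not_mem hnot,
      ih ha ((List.pairwise_cons.1 hb).2)]

-- the whole equality, on the underlying character lists
lemma core_eq (s1 s2 : List Char) :
    (((s1.foldl (fun (st : List Char × List Char) letter =>
          if letter ∈ st.2 then (st.1.erase letter, st.2.erase letter) else st)
        (s1, s2)).1.length
      + (s1.foldl (fun (st : List Char × List Char) letter =>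
          if letter ∈ st.2 then (st.1.erase letter, st.2.erase letter) else st)
        (s1, s2)).2.length : Nat) : Int)
    = ((s1.mergeSort (fun x y => decide (x ≤ y))).length : Int)
      + ((s2.mergeSort (fun x y => decide (x ≤ y))).length : Int)
      - 2 * (altCommon (s1.mergeSort (fun x y => decide (x ≤ y)))
               (s2.mergeSort (fun x y => decide (x ≤ y))) : Int) := by
  obtain ⟨h1, h2⟩ := loopA_invariant s1 s2 s1 0 (by simp)
  have hperm1 : (s1.mergeSort (fun x y => decide (x ≤ y))).Perm s1 := List.mergeSort_perm _ _
  have hperm2 : (s2.mergeSort (fun x y => decide (x ≤ y))).Perm s2 := List.mergeSort_perm _ _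
  have hs1 : (↑(s1.mergeSort (fun x y => decide (x ≤ y))) : Multiset Char) = ↑s1 :=
    Multiset.coe_eq_coe.2 hperm1
  have hs2 : (↑(s2.mergeSort (fun x y => decide (x ≤ y))) : Multiset Char) = ↑s2 :=
    Multiset.coe_eq_coe.2 hperm2
  have hsorted1 : (s1.mergeSort (fun x y => decide (x ≤ y))).Pairwise (· ≤ ·) := by
    have := @List.pairwise_mergeSort Char (fun x y => decide (x ≤ y))
      (fun a b c hab hbc => by
        simp only [decide_eq_true_eq] at *; exact le_trans hab hbc)
      (fun a b => by
        simp only [Bool.or_eq_true, decide_eq_true_eq]; exact le_total a b) s1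
    exact this.imp (fun h => by simpa using h)
  have hsorted2 : (s2.mergeSort (fun x y => decide (x ≤ y))).Pairwise (· ≤ ·) := by
    have := @List.pairwise_mergeSort Char (fun x y => decide (x ≤ y))
      (fun a b c hab hbc => by
        simp only [decide_eq_true_eq] at *; exact le_trans hab hbc)
      (fun a b => by
        simp only [Bool.or_eq_true, decide_eq_true_eq]; exact le_total a b) s2
    exact this.imp (fun h => by simpa using h)
  have hcommon := altCommon_eq_card_inter _ _ hsorted1 hsorted2
  rw [hs1, hs2] at hcommon
  have hl1 : (s1.foldl (fun (st : List Char × List Char) letter =>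
        if letter ∈ st.2 then (st.1.erase letter, st.2.erase letter) else st)
      (s1, s2)).1.length = Multiset.card ((↑s1 : Multiset Char) - (↑s2 : Multiset Char)) := by
    have := congrArg Multiset.card h1
    simpa using this
  have hl2 : (s1.foldl (fun (st : List Char × List Char) letter =>
        if letter ∈ st.2 then (st.1.erase letter, st.2.erase letter) else st)
      (s1, s2)).2.length = Multiset.card ((↑s2 : Multiset Char) - (↑s1 : Multiset Char)) := by
    have := congrArg Multiset.card h2
    simpa using this
  have hsub1 : Multiset.card ((↑s1 : Multiset Char) - (↑s2 : Multiset Char))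
      + Multiset.card ((↑s1 : Multiset Char) ∩ (↑s2 : Multiset Char)) = s1.length := by
    have := congrArg Multiset.card (Multiset.sub_add_inter (↑s1 : Multiset Char) (↑s2 : Multiset Char))
    simpa using this
  have hsub2 : Multiset.card ((↑s2 : Multiset Char) - (↑s1 : Multiset Char))
      + Multiset.card ((↑s1 : Multiset Char) ∩ (↑s2 : Multiset Char)) = s2.length := by
    have := congrArg Multiset.card (Multiset.sub_add_inter (↑s2 : Multiset Char) (↑s1 : Multiset Char))
    rw [Multiset.inter_comm] at this
    simpa using this
  have hlen1 : (s1.mergeSort (fun x y => decide (x ≤ y))).length = s1.length :=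
    hperm1.length_eq
  have hlen2 : (s2.mergeSort (fun x y => decide (x ≤ y))).length = s2.length :=
    hperm2.length_eq
  rw [hl1, hl2, hlen1, hlen2, hcommon]
  omega

-- ===== VERDICT (by name: the statement is the Claim_ definition above) =====
theorem remove_common_letters_spec : Claim_equal_remove_common_letters := by
  intro name1 name2 _
  unfold Spec_remove_common_letters remove_common_letters remove_common_letters_alt
  exact core_eq _ _
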